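-- pv_equiv track=rewrite | github.com/wyk18703232953/myResearch | codeComplex/t.py | task_O_n_log_n
-- ===== SOURCE A (Python) =====
-- def task_O_n_log_n(n):
--     # O(n log n): 外层线性，内层折半
--     count = 0
--     for i in range(n):
--         j = n
--         while j > 1:
--             j //= 2
--             count += 1
--     return count
-- ===== SOURCE B (Python) =====
-- def task_O_n_log_n(n):
--     # each of the n outer iterations performs exactly floor(log2(n)) halvings
--     if n < 2:
--         return 0
--     return n * (n.bit_length() - 1)
-- ===== Notes on version B (the rewrite author's own statement) =====
-- stated objective: faster
-- what changed: Replaces the n * log(n)-step double loop by the closed form n * (n.bit_length() - 1) (0 for n < 2).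
import Mathlib
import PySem

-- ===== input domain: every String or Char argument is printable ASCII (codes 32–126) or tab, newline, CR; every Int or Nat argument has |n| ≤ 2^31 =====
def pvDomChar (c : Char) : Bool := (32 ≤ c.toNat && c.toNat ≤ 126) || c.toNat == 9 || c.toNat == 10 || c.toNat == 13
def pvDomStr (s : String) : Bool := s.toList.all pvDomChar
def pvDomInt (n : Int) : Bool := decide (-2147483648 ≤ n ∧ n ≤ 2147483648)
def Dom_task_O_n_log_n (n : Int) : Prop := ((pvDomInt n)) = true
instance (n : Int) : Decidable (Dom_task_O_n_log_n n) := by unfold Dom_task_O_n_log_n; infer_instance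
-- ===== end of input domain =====

-- B replaces A's n·log(n)-step double loop by the closed form n * (bit_length(n) - 1); objective: faster.

-- ===== PORT A =====
-- inner 'while j > 1: j //= 2; count += 1' loop: returns the number of halving steps
def pvInnerA (j : Int) : Int :=
  if h : 1 < j then pvInnerA (PySem.Int.floordiv j 2) + 1 else 0
termination_by j.toNat
decreasing_by
  rw [PySem.Int.floordiv_eq_ediv_of_pos (by omega : (0:Int) < 2)]
  omega

def task_O_n_log_n (n : Int) : Int :=
  (PySem.List.pyRange 0 n 1).foldl (fun count _ => count + pvInnerA n) 0

-- ===== PORT B =====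
def task_O_n_log_n_alt (n : Int) : Int :=
  if n < 2 then 0 else n * ((PySem.Int.bitLength n : Int) - 1)

-- ===== PRECONDITION & SPEC =====
def Spec_task_O_n_log_n (n : Int) (out : Int) : Prop := out = task_O_n_log_n_alt n
instance (n : Int) (out : Int) : Decidable (Spec_task_O_n_log_n n out) := by unfold Spec_task_O_n_log_n; infer_instance

-- ===== CLAIM (what is proved, stated in full; the proofs are below) =====
def Claim_equal_task_O_n_log_n : Prop := ∀ (n : Int), Dom_task_O_n_log_n n → Spec_task_O_n_log_n n (task_O_n_log_n n)

-- ===== LEMMAS AND PROOFS =====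

-- the inner while-loop counts bitLength n - 1 steps for positive n
theorem pvInnerA_eq (j : Int) (hj : 0 < j) :
    pvInnerA j = (PySem.Int.bitLength j : Int) - 1 := by
  induction j using pvInnerA.induct with
  | case1 j h ih =>
      rw [pvInnerA, dif_pos h]
      have hfd : (0:Int) < PySem.Int.floordiv j 2 := by
        rw [PySem.Int.floordiv_eq_ediv_of_pos (by omega : (0:Int) < 2)]; omega
      rw [ih hfd, PySem.Int.bitLength_of_pos hj]
      have : (1:Nat) ≤ PySem.Int.bitLength (PySem.Int.floordiv j 2) := by
        have hlt := PySem.Int.lt_two_pow_bitLength (PySem.Int.floordiv j 2)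
        by_contra hc
        simp only [not_le, Nat.lt_one_iff] at hc
        rw [hc] at hlt
        simp at hlt
        omega
      push_cast
      omega
  | case2 j h =>
      have hj1 : j = 1 := by omega
      subst hj1
      rw [pvInnerA, dif_neg (by omega)]
      decide

-- folding a constant increment over a list
theorem foldl_const_add (l : List Int) (c k : Int) :
    l.foldl (fun count _ => count + k) c = c + k * l.length := by
  induction l generalizing c with
  | nil => simp
  | cons x xs ih => simp [List.foldl, ih]; ring

-- ===== VERDICT (by name: the statement is the Claim_ definition above) =====
theorem task_O_n_log_n_spec : Claim_equal_task_O_n_log_n := by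
  intro n _
  unfold Spec_task_O_n_log_n task_O_n_log_n task_O_n_log_n_alt
  rw [foldl_const_add, PySem.List.length_pyRange_one]
  by_cases h2 : n < 2
  · rw [if_pos h2]
    by_cases h0 : 0 < n
    · have h1 : n = 1 := by omega
      subst h1
      rw [pvInnerA, dif_neg (by omega)]
      simp
    · have : (n - 0).toNat = 0 := by omega
      rw [this]; simp
  · rw [if_neg h2, pvInnerA_eq n (by omega)]
    have : ((n - 0).toNat : Int) = n := by omega
    rw [this]; ring
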